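-- pv_equiv track=rewrite | github.com/alehdezp/alphaswarm-sol | src/alphaswarm_sol/kg/heuristics.py | classify_auth_modifiers
-- ===== SOURCE A (Python) =====
-- from typing import Iterable
--
-- def classify_auth_modifiers(modifiers: Iterable[str]) -> list[str]:
--     tags: set[str] = set()
--     for modifier in modifiers:
--         lowered = modifier.lower()
--         if "only" in lowered and "owner" in lowered:
--             tags.add("only_owner")
--         if "only" in lowered and "admin" in lowered:
--             tags.add("only_admin")
--         if "role" in lowered or "accesscontrol" in lowered:
--             tags.add("role")
--         if "governor" in lowered or "governance" in lowered or "guardian" in lowered: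
--             tags.add("governance")
--         if "whitelist" in lowered or "allowlist" in lowered:
--             tags.add("allowlist")
--         if "pauser" in lowered or "pause" in lowered:
--             tags.add("pause")
--     return sorted(tags)
-- ===== SOURCE B (Python) =====
-- from typing import Iterable
--
-- def classify_auth_modifiers(modifiers: Iterable[str]) -> list[str]:
--     lowered = [m.lower() for m in modifiers]
--     def any_has(words):
--         return any(any(w in l for w in words) for l in lowered)
--     def any_has_all(words):
--         return any(all(w in l for w in words) for l in lowered)
--     result: list[str] = []
--     if any_has(["whitelist", "allowlist"]):
--         result.append("allowlist")
--     if any_has(["governor", "governance", "guardian"]):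
--         result.append("governance")
--     if any_has_all(["only", "admin"]):
--         result.append("only_admin")
--     if any_has_all(["only", "owner"]):
--         result.append("only_owner")
--     if any_has(["pauser", "pause"]):
--         result.append("pause")
--     if any_has(["role", "accesscontrol"]):
--         result.append("role")
--     return result
-- ===== Notes on version B (the rewrite author's own statement) =====
-- stated objective: alternative
-- what changed: Inverts the traversal: instead of one pass over modifiers accumulating tags in a set and sorting at the end, B scans modifiers once per tag (tags enumerated in alphabetical order) and emits the output directly in sorted order, with no set and no sort.
import Mathlib
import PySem

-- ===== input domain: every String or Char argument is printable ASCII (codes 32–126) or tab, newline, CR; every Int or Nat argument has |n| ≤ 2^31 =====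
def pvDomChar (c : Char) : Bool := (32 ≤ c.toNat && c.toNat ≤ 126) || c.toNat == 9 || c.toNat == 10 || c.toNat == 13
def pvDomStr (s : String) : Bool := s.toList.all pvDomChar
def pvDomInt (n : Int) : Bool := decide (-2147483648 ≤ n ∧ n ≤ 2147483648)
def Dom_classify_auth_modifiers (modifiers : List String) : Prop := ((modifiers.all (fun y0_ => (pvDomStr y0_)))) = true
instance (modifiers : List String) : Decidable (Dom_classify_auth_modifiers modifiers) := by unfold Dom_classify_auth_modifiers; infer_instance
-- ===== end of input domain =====

-- B inverts the traversal: it scans the modifiers once per tag, with the tags enumerated in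
-- alphabetical order, so the result is emitted directly in sorted order with no set and no sort.

-- ===== PORT A =====
def classify_auth_modifiers (modifiers : List String) : List String :=
  let tags : PySem.Set String :=
    modifiers.foldl (fun tags modifier =>
      let lowered := PySem.Str.lower modifier
      let tags := if PySem.Str.isIn "only" lowered && PySem.Str.isIn "owner" lowered then
        PySem.Set.add tags "only_owner" else tags
      let tags := if PySem.Str.isIn "only" lowered && PySem.Str.isIn "admin" lowered then
        PySem.Set.add tags "only_admin" else tags
      let tags := if PySem.Str.isIn "role" lowered || PySem.Str.isIn "accesscontrol" lowered then
        PySem.Set.add tags "role" else tags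
      let tags := if PySem.Str.isIn "governor" lowered || PySem.Str.isIn "governance" lowered || PySem.Str.isIn "guardian" lowered then
        PySem.Set.add tags "governance" else tags
      let tags := if PySem.Str.isIn "whitelist" lowered || PySem.Str.isIn "allowlist" lowered then
        PySem.Set.add tags "allowlist" else tags
      let tags := if PySem.Str.isIn "pauser" lowered || PySem.Str.isIn "pause" lowered then
        PySem.Set.add tags "pause" else tags
      tags) PySem.Set.empty
  PySem.List.sorted tags (fun x => x) false

-- ===== PORT B =====
def classify_auth_modifiers_alt (modifiers : List String) : List String :=
  let lowered := modifiers.map PySem.Str.lower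
  let anyHas := fun (words : List String) =>
    lowered.any (fun l => words.any (fun w => PySem.Str.isIn w l))
  let anyHasAll := fun (words : List String) =>
    lowered.any (fun l => words.all (fun w => PySem.Str.isIn w l))
  let result : List String := []
  let result := if anyHas ["whitelist", "allowlist"] then result ++ ["allowlist"] else result
  let result := if anyHas ["governor", "governance", "guardian"] then result ++ ["governance"] else result
  let result := if anyHasAll ["only", "admin"] then result ++ ["only_admin"] else result
  let result := if anyHasAll ["only", "owner"] then result ++ ["only_owner"] else result
  let result := if anyHas ["pauser", "pause"] then result ++ ["pause"] else result
  let result := if anyHas ["role", "accesscontrol"] then result ++ ["role"] else result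
  result

-- ===== PRECONDITION & SPEC =====
def Spec_classify_auth_modifiers (modifiers : List String) (out : List String) : Prop := out = classify_auth_modifiers_alt modifiers
instance (modifiers : List String) (out : List String) : Decidable (Spec_classify_auth_modifiers modifiers out) := by unfold Spec_classify_auth_modifiers; infer_instance

-- ===== CLAIM (what is proved, stated in full; the proofs are below) =====
def Claim_equal_classify_auth_modifiers : Prop := ∀ (modifiers : List String), Dom_classify_auth_modifiers modifiers → Spec_classify_auth_modifiers modifiers (classify_auth_modifiers modifiers)

-- ===== LEMMAS AND PROOFS =====

-- per-modifier conditions of A, named for the proof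
def pvCOO (m : String) : Bool := PySem.Str.isIn "only" (PySem.Str.lower m) && PySem.Str.isIn "owner" (PySem.Str.lower m)
def pvCOA (m : String) : Bool := PySem.Str.isIn "only" (PySem.Str.lower m) && PySem.Str.isIn "admin" (PySem.Str.lower m)
def pvCRole (m : String) : Bool := PySem.Str.isIn "role" (PySem.Str.lower m) || PySem.Str.isIn "accesscontrol" (PySem.Str.lower m)
def pvCGov (m : String) : Bool := PySem.Str.isIn "governor" (PySem.Str.lower m) || PySem.Str.isIn "governance" (PySem.Str.lower m) || PySem.Str.isIn "guardian" (PySem.Str.lower m)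
def pvCAllow (m : String) : Bool := PySem.Str.isIn "whitelist" (PySem.Str.lower m) || PySem.Str.isIn "allowlist" (PySem.Str.lower m)
def pvCPause (m : String) : Bool := PySem.Str.isIn "pauser" (PySem.Str.lower m) || PySem.Str.isIn "pause" (PySem.Str.lower m)

-- A's loop body, named
def pvStep (tags : PySem.Set String) (modifier : String) : PySem.Set String :=
  let tags := if pvCOO modifier then PySem.Set.add tags "only_owner" else tags
  let tags := if pvCOA modifier then PySem.Set.add tags "only_admin" else tags
  let tags := if pvCRole modifier then PySem.Set.add tags "role" else tags
  let tags := if pvCGov modifier then PySem.Set.add tags "governance" else tags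
  let tags := if pvCAllow modifier then PySem.Set.add tags "allowlist" else tags
  let tags := if pvCPause modifier then PySem.Set.add tags "pause" else tags
  tags

theorem pvA_eq (modifiers : List String) :
    classify_auth_modifiers modifiers
      = PySem.List.sorted (modifiers.foldl pvStep PySem.Set.empty) (fun x => x) false := rfl

-- which tag a single modifier contributes
def pvFired (x m : String) : Prop :=
  (x = "only_owner" ∧ pvCOO m = true) ∨ (x = "only_admin" ∧ pvCOA m = true) ∨
  (x = "role" ∧ pvCRole m = true) ∨ (x = "governance" ∧ pvCGov m = true) ∨
  (x = "allowlist" ∧ pvCAllow m = true) ∨ (x = "pause" ∧ pvCPause m = true)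

theorem pv_mem_condAdd (c : Bool) (s : PySem.Set String) (t x : String) :
    x ∈ (if c = true then PySem.Set.add s t else s) ↔ x ∈ s ∨ (x = t ∧ c = true) := by
  cases c <;> simp [PySem.Set.mem_add]

set_option maxHeartbeats 1600000 in
theorem pv_mem_step (x : String) (s : PySem.Set String) (m : String) :
    x ∈ pvStep s m ↔ x ∈ s ∨ pvFired x m := by
  simp only [pvStep, pv_mem_condAdd, pvFired, or_assoc]

theorem pv_nodup_step (s : PySem.Set String) (m : String) (h : s.Nodup) : (pvStep s m).Nodup := by
  unfold pvStep
  split_ifs <;> repeat first | exact PySem.Set.nodup_add _ _ h | apply PySem.Set.nodup_add | exact h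

theorem pv_mem_fold (x : String) (ms : List String) (s : PySem.Set String) :
    x ∈ ms.foldl pvStep s ↔ x ∈ s ∨ ∃ m ∈ ms, pvFired x m := by
  induction ms generalizing s with
  | nil => simp
  | cons a t ih =>
    simp only [List.foldl_cons, ih, pv_mem_step, List.mem_cons]
    constructor
    · rintro ((h | h) | ⟨m, hm, hf⟩)
      · exact Or.inl h
      · exact Or.inr ⟨a, Or.inl rfl, h⟩
      · exact Or.inr ⟨m, Or.inr hm, hf⟩
    · rintro (h | ⟨m, (rfl | hm), hf⟩)
      · exact Or.inl (Or.inl h)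
      · exact Or.inl (Or.inr hf)
      · exact Or.inr ⟨m, hm, hf⟩

theorem pv_nodup_fold (ms : List String) (s : PySem.Set String) (h : s.Nodup) :
    (ms.foldl pvStep s).Nodup := by
  induction ms generalizing s with
  | nil => exact h
  | cons a t ih => exact ih _ (pv_nodup_step _ _ h)

theorem pv_mem_condApp (c : Bool) (r : List String) (t x : String) :
    x ∈ (if c = true then r ++ [t] else r) ↔ x ∈ r ∨ (x = t ∧ c = true) := by
  cases c <;> simp

-- membership in B's result
theorem pv_mem_alt (x : String) (ms : List String) :
    x ∈ classify_auth_modifiers_alt ms ↔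
      (x = "allowlist" ∧ ms.any pvCAllow = true) ∨
      (x = "governance" ∧ ms.any pvCGov = true) ∨
      (x = "only_admin" ∧ ms.any pvCOA = true) ∨
      (x = "only_owner" ∧ ms.any pvCOO = true) ∨
      (x = "pause" ∧ ms.any pvCPause = true) ∨
      (x = "role" ∧ ms.any pvCRole = true) := by
  simp only [classify_auth_modifiers_alt, pv_mem_condApp, List.not_mem_nil, false_or, or_assoc,
    List.any_map, Function.comp_def, List.any_cons, List.any_nil, List.all_cons, List.all_nil,
    Bool.or_false, Bool.and_true]
  unfold pvCAllow pvCGov pvCOA pvCOO pvCPause pvCRole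
  simp only [Bool.or_assoc]

-- pvFired over some modifier, regrouped per tag
theorem pv_fired_any (x : String) (ms : List String) :
    (∃ m ∈ ms, pvFired x m) ↔
      (x = "allowlist" ∧ ms.any pvCAllow = true) ∨
      (x = "governance" ∧ ms.any pvCGov = true) ∨
      (x = "only_admin" ∧ ms.any pvCOA = true) ∨
      (x = "only_owner" ∧ ms.any pvCOO = true) ∨
      (x = "pause" ∧ ms.any pvCPause = true) ∨
      (x = "role" ∧ ms.any pvCRole = true) := by
  constructor
  · rintro ⟨m, hm, hf⟩
    rcases hf with ⟨rfl, hc⟩ | ⟨rfl, hc⟩ | ⟨rfl, hc⟩ | ⟨rfl, hc⟩ | ⟨rfl, hc⟩ | ⟨rfl, hc⟩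
    · exact Or.inr (Or.inr (Or.inr (Or.inl ⟨rfl, List.any_eq_true.2 ⟨m, hm, hc⟩⟩)))
    · exact Or.inr (Or.inr (Or.inl ⟨rfl, List.any_eq_true.2 ⟨m, hm, hc⟩⟩))
    · exact Or.inr (Or.inr (Or.inr (Or.inr (Or.inr ⟨rfl, List.any_eq_true.2 ⟨m, hm, hc⟩⟩))))
    · exact Or.inr (Or.inl ⟨rfl, List.any_eq_true.2 ⟨m, hm, hc⟩⟩)
    · exact Or.inl ⟨rfl, List.any_eq_true.2 ⟨m, hm, hc⟩⟩
    · exact Or.inr (Or.inr (Or.inr (Or.inr (Or.inl ⟨rfl, List.any_eq_true.2 ⟨m, hm, hc⟩⟩))))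
  · rintro (⟨rfl, hc⟩ | ⟨rfl, hc⟩ | ⟨rfl, hc⟩ | ⟨rfl, hc⟩ | ⟨rfl, hc⟩ | ⟨rfl, hc⟩) <;>
      obtain ⟨m, hm, h⟩ := List.any_eq_true.1 hc
    · exact ⟨m, hm, Or.inr (Or.inr (Or.inr (Or.inr (Or.inl ⟨rfl, h⟩))))⟩
    · exact ⟨m, hm, Or.inr (Or.inr (Or.inr (Or.inl ⟨rfl, h⟩)))⟩
    · exact ⟨m, hm, Or.inr (Or.inl ⟨rfl, h⟩)⟩
    · exact ⟨m, hm, Or.inl ⟨rfl, h⟩⟩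
    · exact ⟨m, hm, Or.inr (Or.inr (Or.inr (Or.inr (Or.inr ⟨rfl, h⟩))))⟩
    · exact ⟨m, hm, Or.inr (Or.inr (Or.inl ⟨rfl, h⟩))⟩

theorem pv_condApp_sublist (c : Bool) (r r' : List String) (t : String) (h : r.Sublist r') :
    (if c = true then r ++ [t] else r).Sublist (r' ++ [t]) := by
  cases c
  · exact h.trans (List.sublist_append_left r' [t])
  · exact h.append (List.Sublist.refl [t])

theorem pv_full_pairwise :
    (["allowlist", "governance", "only_admin", "only_owner", "pause", "role"] :
      List String).Pairwise (fun a b => a < b) := by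
  rw [← List.isChain_iff_pairwise]
  simp only [List.isChain_cons_cons, List.isChain_singleton, and_true]
  refine ⟨?_, ?_, ?_, ?_, ?_⟩ <;> (rw [String.lt_iff_toList_lt]; decide)

-- B's result is strictly increasing
theorem pv_alt_pairwise (ms : List String) :
    (classify_auth_modifiers_alt ms).Pairwise (fun a b => a < b) := by
  have hsub : (classify_auth_modifiers_alt ms).Sublist
      ((((([] ++ ["allowlist"]) ++ ["governance"]) ++ ["only_admin"]) ++ ["only_owner"]
        ++ ["pause"]) ++ ["role"]) := by
    simp only [classify_auth_modifiers_alt]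
    apply pv_condApp_sublist
    apply pv_condApp_sublist
    apply pv_condApp_sublist
    apply pv_condApp_sublist
    apply pv_condApp_sublist
    apply pv_condApp_sublist
    exact List.Sublist.refl []
  exact pv_full_pairwise.sublist hsub

-- ===== VERDICT (by name: the statement is the Claim_ definition above) =====
set_option maxHeartbeats 1000000 in
theorem classify_auth_modifiers_spec : Claim_equal_classify_auth_modifiers := by
  intro modifiers _
  unfold Spec_classify_auth_modifiers
  rw [pvA_eq]
  apply PySem.List.sorted_eq_of_perm_of_pairwise_lt
  · refine (List.perm_ext_iff_of_nodup ?_ ?_).2 ?_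
    · exact (pv_alt_pairwise modifiers).imp (fun h => ne_of_lt h)
    · exact pv_nodup_fold modifiers PySem.Set.empty (by simp [PySem.Set.empty])
    · intro x
      rw [pv_mem_alt, pv_mem_fold, pv_fired_any]
      simp [PySem.Set.empty]
  · exact pv_alt_pairwise modifiers
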